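-- pv_equiv track=rewrite | github.com/keskinsaf/ITU-UndergraduateCourses | AI-BLG435E/Homeworks/hw1/Classes/Board.py | init_rows
-- ===== SOURCE A (Python) =====
-- def init_rows(sob, fil, mis=0 ):
--     rows = []
--     for i in range(mis) if mis != 0 else range(fil):
--         row = []
--         for i in range( sob ):
--             if mis != 0 and (i < mis or i >= mis + fil):
--                 row.append(" ")
--             else:
--                 row.append(".")
--         rows.append(row)
--     return rows
-- ===== SOURCE B (Python) =====
-- def init_rows(sob, fil, mis=0):
--     # Every row is identical: build one row from three clipped segments, then copy it.
--     count = mis if mis != 0 else fil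
--     if count <= 0:
--         return []
--     n = max(sob, 0)
--     if mis != 0:
--         spaces = min(max(mis, 0), n)
--         dots = min(max(fil, 0), n - spaces)
--         row = [" "] * spaces + ["."] * dots + [" "] * (n - spaces - dots)
--     else:
--         row = ["."] * n
--     return [list(row) for _ in range(count)]
-- ===== Notes on version B (the rewrite author's own statement) =====
-- stated objective: simpler
-- what changed: B builds one shared row by concatenating three replicated segments (spaces, dots, padding) clipped to the width, then copies it once per output row, instead of A's nested loop with a per-cell branch.
import Mathlib
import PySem

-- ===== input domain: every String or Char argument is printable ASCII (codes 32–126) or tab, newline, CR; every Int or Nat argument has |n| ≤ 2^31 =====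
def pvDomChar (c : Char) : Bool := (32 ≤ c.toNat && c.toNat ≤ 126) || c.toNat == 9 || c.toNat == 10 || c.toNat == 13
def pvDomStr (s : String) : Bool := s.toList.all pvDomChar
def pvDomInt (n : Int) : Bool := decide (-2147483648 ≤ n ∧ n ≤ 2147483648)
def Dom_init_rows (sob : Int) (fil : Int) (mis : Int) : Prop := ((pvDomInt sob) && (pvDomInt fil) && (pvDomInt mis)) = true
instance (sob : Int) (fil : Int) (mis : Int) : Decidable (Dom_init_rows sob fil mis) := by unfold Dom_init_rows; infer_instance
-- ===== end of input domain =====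

-- B replaces the per-cell branching with segment concatenation: one shared row built
-- from three replicated segments, copied once per output row (objective: simpler).

-- ===== PORT A =====
def init_rows (sob : Int) (fil : Int) (mis : Int) : List (List String) :=
  (PySem.List.pyRange 0 (if mis ≠ 0 then mis else fil) 1).foldl
    (fun rows _ =>
      rows ++ [(PySem.List.pyRange 0 sob 1).foldl
        (fun row i => row ++ [if mis ≠ 0 ∧ (i < mis ∨ i ≥ mis + fil) then " " else "."]) []])
    []

-- ===== PORT B =====
-- B's row: three clipped segments (leading spaces, dots, trailing spaces)
def pvRowB (sob : Int) (fil : Int) (mis : Int) : List String :=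
  let n : Nat := (max sob 0).toNat
  if mis ≠ 0 then
    let spaces : Nat := min (max mis 0).toNat n
    let dots : Nat := min (max fil 0).toNat (n - spaces)
    List.replicate spaces " " ++ List.replicate dots "." ++ List.replicate (n - spaces - dots) " "
  else
    List.replicate n "."

def init_rows_alt (sob : Int) (fil : Int) (mis : Int) : List (List String) :=
  let count : Int := if mis ≠ 0 then mis else fil
  if count ≤ 0 then []
  else (PySem.List.pyRange 0 count 1).map (fun _ => pvRowB sob fil mis)

-- ===== PRECONDITION & SPEC =====
def Spec_init_rows (sob : Int) (fil : Int) (mis : Int) (out : List (List String)) : Prop := out = init_rows_alt sob fil mis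
instance (sob : Int) (fil : Int) (mis : Int) (out : List (List String)) : Decidable (Spec_init_rows sob fil mis out) := by unfold Spec_init_rows; infer_instance

-- ===== CLAIM (what is proved, stated in full; the proofs are below) =====
def Claim_equal_init_rows : Prop := ∀ (sob : Int) (fil : Int) (mis : Int), Dom_init_rows sob fil mis → Spec_init_rows sob fil mis (init_rows sob fil mis)

-- ===== LEMMAS AND PROOFS =====

-- appending a constant element each step builds a replicate
theorem foldl_append_const {α β : Type} (l : List α) (r : List β) (x : β) :
    l.foldl (fun acc _ => acc ++ [x]) r = r ++ List.replicate l.length x := by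
  induction l generalizing r with
  | nil => simp
  | cons a t ih =>
    simp only [List.foldl, ih, List.length_cons, List.append_assoc]
    rw [List.singleton_append, ← List.replicate_succ, List.replicate_succ']

-- appending f i each step builds a map
theorem foldl_append_map {α β : Type} (l : List α) (r : List β) (f : α → β) :
    l.foldl (fun acc i => acc ++ [f i]) r = r ++ l.map f := by
  induction l generalizing r with
  | nil => simp
  | cons a t ih => simp [List.foldl, ih]

-- the inner row of A equals B's segment-built row (only needed when some row exists,
-- i.e. when the outer count is positive)
theorem row_eq (sob fil mis : Int) (hm : mis ≠ 0 → 0 < mis) :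
    (PySem.List.pyRange 0 sob 1).map
      (fun i => if mis ≠ 0 ∧ (i < mis ∨ i ≥ mis + fil) then " " else ".") =
    pvRowB sob fil mis := by
  have hr := PySem.List.pyRange_one 0 sob
  unfold pvRowB
  by_cases h : mis = 0
  · subst h
    simp [hr, Function.comp_def, List.map_const']
    omega
  · have hmpos := hm h
    simp only [if_pos h]
    apply List.ext_getElem
    · simp [hr]; omega
    · intro k h1 h2
      simp only [hr, Int.sub_zero, zero_add, List.getElem_map, List.getElem_range,
        List.getElem_append, List.getElem_replicate, List.length_replicate,
        List.length_append, List.length_map] at h1 h2 ⊢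
      split_ifs <;> first | rfl | (exfalso; omega)

-- ===== VERDICT (by name: the statement is the Claim_ definition above) =====
theorem init_rows_spec : Claim_equal_init_rows := by
  intro sob fil mis _
  unfold Spec_init_rows init_rows init_rows_alt
  rw [foldl_append_const]
  simp only [List.nil_append]
  set count : Int := if mis ≠ 0 then mis else fil with hc
  by_cases hz : count ≤ 0
  · rw [if_pos hz]
    have : PySem.List.pyRange 0 count 1 = [] := by
      rw [PySem.List.pyRange_one]
      simp
      omega
    simp [this]
  · rw [if_neg hz, List.map_const']
    congr 1
    have hm : mis ≠ 0 → 0 < mis := by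
      intro h; rw [hc, if_pos h] at hz; omega
    rw [foldl_append_map, List.nil_append]
    exact row_eq sob fil mis hm
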